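/- GENERATED by c/gen_decode.py: decode facts of the image, one per distinct instruction byte string. -/
import UserX.DecodeImage

#decode_all Vorbis.Dec
  "0f28cf"  -- movaps xmm1,xmm7
  "0f845dffffff"  -- je 112f26
  "0f84fcfeffff"  -- je 114f23
  "0f88a8000000"  -- js 10f115
  "0f8f59010000"  -- jg 113dd3
  "0fb6c0"  -- movzx eax,al
  "39ab9c000000"  -- cmp DWORD PTR [rbx+0x9c],ebp
  "410fb62c6f"  -- movzx ebp,BYTE PTR [r15+rbp*2]
  "4156"  -- push r14
  "41890424"  -- mov DWORD PTR [r12],eax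
  "418b5e1c"  -- mov ebx,DWORD PTR [r14+0x1c]
  "41c7850400c00004f204f2"  -- mov DWORD PTR [r13+0xc00004],0xf204f204
  "4401e0"  -- add eax,r12d
  "4439e5"  -- cmp ebp,r12d
  "44896db8"  -- mov DWORD PTR [rbp-0x48],r13d
  "4489f8"  -- mov eax,r15d
  "448babe4060000"  -- mov r13d,DWORD PTR [rbx+0x6e4]
  "4539ec"  -- cmp r12d,r13d
  "458b3c24"  -- mov r15d,DWORD PTR [r12]
  "48030b"  -- add rcx,QWORD PTR [rbx]
  "48638540080000"  -- movsxd rax,DWORD PTR [rbp+0x840]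
  "48837d7000"  -- cmp QWORD PTR [rbp+0x70],0x0
  "4889442410"  -- mov QWORD PTR [rsp+0x10],rax
  "4889e8"  -- mov rax,rbp
  "488b7508"  -- mov rsi,QWORD PTR [rbp+0x8]
  "488d2c69"  -- lea rbp,[rcx+rbp*2]
  "488d7b40"  -- lea rdi,[rbx+0x40]
  "488d90f0faffff"  -- lea rdx,[rax-0x510]
  "488dbc24a0000000"  -- lea rdi,[rsp+0xa0]
  "48c1e006"  -- shl rax,0x6
  "4901c6"  -- add r14,rax
  "4963fc"  -- movsxd rdi,r12d
  "498b44cc08"  -- mov rax,QWORD PTR [r12+rcx*8+0x8]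
  "498d7e08"  -- lea rdi,[r14+0x8]
  "49c1e502"  -- shl r13,0x2
  "4a8dbce568030000"  -- lea rdi,[rbp+r12*8+0x368]
  "4c63ad68ffffff"  -- movsxd r13,DWORD PTR [rbp-0x98]
  "4c89ed"  -- mov rbp,r13
  "4c8d2428"  -- lea r12,[rax+rbp*1]
  "4d037708"  -- add r14,QWORD PTR [r15+0x8]
  "4d8d6e6c"  -- lea r13,[r14+0x6c]
  "660f2fc4"  -- comisd xmm0,xmm4
  "66410f7ece"  -- movd r14d,xmm1
  "66c783520100000000"  -- mov WORD PTR [rbx+0x152],0x0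
  "7430"  -- je 10b14c
  "7524"  -- jne 1136fd
  "787e"  -- js 1087e6
  "7e37"  -- jle 107745
  "80b90000c00000"  -- cmp BYTE PTR [rcx+0xc00000],0x0
  "83c00a"  -- add eax,0xa
  "8943a0"  -- mov DWORD PTR [rbx-0x60],eax
  "8983ec060000"  -- mov DWORD PTR [rbx+0x6ec],eax
  "8b1424"  -- mov edx,DWORD PTR [rsp]
  "8b6c2424"  -- mov ebp,DWORD PTR [rsp+0x24]
  "8d0c03"  -- lea ecx,[rbx+rax*1]
  "bb01000000"  -- mov ebx,0x1
  "c1ff14"  -- sar edi,0x14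
  "c7830807000000000000"  -- mov DWORD PTR [rbx+0x708],0x0
  "e801e5feff"  -- call 103d00
  "e80baefeff"  -- call 100720
  "e816baffff"  -- call 100480
  "e81efdffff"  -- call 104c60
  "e829acfeff"  -- call 100300
  "e831bcffff"  -- call 100560
  "e83ca6feff"  -- call 100640
  "e847d4feff"  -- call 100720
  "e852a3feff"  -- call 100640
  "e85e4affff"  -- call 108f20
  "e86b1bffff"  -- call 100800
  "e876b8ffff"  -- call 104fe0
  "e8817dffff"  -- call 100c00
  "e88cdfffff"  -- call 10d440
  "e895fbffff"  -- call 107500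
  "e8a028ffff"  -- call 100640
  "e8ab6cffff"  -- call 100720
  "e8b3f5ffff"  -- call 100059
  "e8be7dffff"  -- call 100800
  "e8c8b4ffff"  -- call 100640
  "e8d267ffff"  -- call 100640
  "e8dc85ffff"  -- call 10d1c0
  "e8e675ffff"  -- call 10d1c0
  "e8ee7dffff"  -- call 10d1c0
  "e8f900ffff"  -- call 103d00
  "e91cd5ffff"  -- jmp 113b22
  "e963f9ffff"  -- jmp 113b22
  "e9b6feffff"  -- jmp 10f1a7
  "eb05"  -- jmp 10163e
  "eb9b"  -- jmp 115b7e
  "ebf7"  -- jmp 10cfb0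
  "f20f59058c430100"  -- mulsd xmm0,QWORD PTR [rip+0x1438c]
  "f20f5e1dd7da0100"  -- divsd xmm3,QWORD PTR [rip+0x1dad7]
  "f30f105bf8"  -- movss xmm3,DWORD PTR [rbx-0x8]
  "f30f107db0"  -- movss xmm7,DWORD PTR [rbp-0x50]
  "f30f115808"  -- movss DWORD PTR [rax+0x8],xmm3
  "f30f117df0"  -- movss DWORD PTR [rbp-0x10],xmm7
  "f30f592b"  -- mulss xmm5,DWORD PTR [rbx]
  "f30f5c6bec"  -- subss xmm5,DWORD PTR [rbx-0x14]
  "f3410f106c2404"  -- movss xmm5,DWORD PTR [r12+0x4]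
  "f7d8"  -- neg eax
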